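-- pv_equiv track=rewrite | github.com/zombiewafle/Challenge_1---Algebra_1 | Algebra_Lineal_1_Challenge_1_Edgar_Toledo_Javier_Salazar.py | verify_Codabar
-- ===== SOURCE A (Python) =====
-- def verify_Codabar(Codabar):
--     counter = 1
--     total = 0
--     for d in reversed(Codabar):
--         if d is 'X':
--             if counter != 1:
--                 return False
--             d = '13'
--         if d.isdigit():
--             total += int(d) * counter
--             counter += 1
--     return counter == 16 and total % 16 == 0
-- ===== SOURCE B (Python) =====
-- def verify_Codabar(Codabar):
--     # forward single pass, no reversal: right-to-left position weights are
--     # realized by the prefix-sum trick (t accumulates the running sum s, so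
--     # each value ends up multiplied by its distance from the right end).
--     s = 0
--     t = 0
--     n = 0
--     seen_x = False
--     for c in Codabar:
--         if c.isdigit() or c == 'X':
--             if seen_x:
--                 return False
--             v = 13 if c == 'X' else int(c)
--             s += v
--             t += s
--             n += 1
--             seen_x = c == 'X'
--     return n == 15 and t % 16 == 0
-- ===== Notes on version B (the rewrite author's own statement) =====
-- stated objective: alternative
-- what changed: A scans the string reversed with an explicit position counter multiplying each digit by its weight; B scans forward once with no reversal and no weights, realizing the right-to-left position weighting by a prefix-sum trick (t accumulates the running sum s) and rejecting a misplaced check character with a seen-X flag instead of a counter test.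
import Mathlib
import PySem

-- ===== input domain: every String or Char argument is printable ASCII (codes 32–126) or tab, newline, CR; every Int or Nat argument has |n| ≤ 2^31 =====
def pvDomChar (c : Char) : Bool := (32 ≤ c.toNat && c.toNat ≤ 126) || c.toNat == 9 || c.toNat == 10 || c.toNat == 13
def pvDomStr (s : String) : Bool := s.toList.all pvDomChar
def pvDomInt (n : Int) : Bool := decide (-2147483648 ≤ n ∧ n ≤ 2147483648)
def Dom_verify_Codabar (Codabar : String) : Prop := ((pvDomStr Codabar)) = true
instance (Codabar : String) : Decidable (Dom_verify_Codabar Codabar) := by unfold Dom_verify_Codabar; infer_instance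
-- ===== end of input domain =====

-- B replaces A's reversed scan with explicit position weights by a single forward
-- pass using a prefix-sum trick and a seen-X flag (same cost, no reversal).

-- ===== PORT A =====
-- the loop over reversed(Codabar); counter/total threaded as state, early `return False` as Bool.
-- `int(d)` on an ASCII digit char is (c.toNat - 48); after the X-branch, d='13' with int('13')=13,
-- transliterated as the 13 * counter / counter+1 step in the X branch.
def pvLoopA : List Char → Int → Int → Bool
  | [], counter, total => counter == 16 && total % 16 == 0
  | c :: rest, counter, total =>
    if c == 'X' then
      if counter ≠ 1 then false
      else pvLoopA rest (counter + 1) (total + 13 * counter)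
    else if c.isDigit then
      pvLoopA rest (counter + 1) (total + ((c.toNat : Int) - 48) * counter)
    else pvLoopA rest counter total

def verify_Codabar (Codabar : String) : Bool :=
  pvLoopA Codabar.toList.reverse 1 0

-- ===== PORT B =====
-- forward loop with state s (running sum of values), t (sum of the running sums,
-- which yields the right-to-left weighted total), n (count) and the seen-X flag.
def pvLoopB : List Char → Int → Int → Int → Bool → Bool
  | [], _, t, n, _ => n == 15 && t % 16 == 0
  | c :: rest, s, t, n, seenx =>
    if c.isDigit || c == 'X' then
      if seenx then false
      else
        let v : Int := if c == 'X' then 13 else (c.toNat : Int) - 48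
        pvLoopB rest (s + v) (t + (s + v)) (n + 1) (c == 'X')
    else pvLoopB rest s t n seenx

def verify_Codabar_alt (Codabar : String) : Bool :=
  pvLoopB Codabar.toList 0 0 0 false

-- ===== PRECONDITION & SPEC =====
def Spec_verify_Codabar (Codabar : String) (out : Bool) : Prop := out = verify_Codabar_alt Codabar
instance (Codabar : String) (out : Bool) : Decidable (Spec_verify_Codabar Codabar out) := by unfold Spec_verify_Codabar; infer_instance

-- ===== CLAIM (what is proved, stated in full; the proofs are below) =====
def Claim_equal_verify_Codabar : Prop := ∀ (Codabar : String), Dom_verify_Codabar Codabar → Spec_verify_Codabar Codabar (verify_Codabar Codabar)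

-- ===== LEMMAS AND PROOFS =====

-- value of a contributing character: 13 for 'X', else its digit value
def pvVal (c : Char) : Int := if c == 'X' then 13 else (c.toNat : Int) - 48

def pvP (c : Char) : Bool := c.isDigit || c == 'X'

-- weighted sum with weights k+1, k+2, … along the list
def pvWeighted : List Char → Nat → Int
  | [], _ => 0
  | c :: rest, k => pvVal c * ((k : Int) + 1) + pvWeighted rest (k + 1)

-- weighted sum with the HEAD getting the largest weight (length), i.e. weights m, m-1, …, 1
def pvW : List Char → Int
  | [] => 0
  | c :: l => pvVal c * ((l.length : Int) + 1) + pvW l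

-- the common closed form A's loop computes (parameterised in counter k+1 and total t)
def pvG (l : List Char) (k : Nat) (t : Int) : Bool :=
  let contrib := l.filter pvP
  if (if k = 0 then contrib.drop 1 else contrib).contains 'X' then false
  else (k + contrib.length == 15) && ((t + pvWeighted contrib k) % 16 == 0)

-- the closed form B's loop computes on the filtered list
def pvC (L : List Char) (s t n : Int) : Bool :=
  if L.dropLast.contains 'X' then false
  else (n + (L.length : Int) == 15) && ((t + (L.length : Int) * s + pvW L) % 16 == 0)

-- ---- A's side (loop = pvG), as before ----
theorem pvLoopA_cons_X (rest : List Char) (counter total : Int) :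
    pvLoopA ('X' :: rest) counter total
      = if counter = 1 then pvLoopA rest (counter + 1) (total + 13 * counter) else false := by
  simp only [pvLoopA, beq_self_eq_true, if_true, ne_eq, ite_not]

theorem pvLoopA_cons_digit (c : Char) (rest : List Char) (counter total : Int)
    (hX : c ≠ 'X') (hd : c.isDigit = true) :
    pvLoopA (c :: rest) counter total
      = pvLoopA rest (counter + 1) (total + ((c.toNat : Int) - 48) * counter) := by
  simp only [pvLoopA, show (c == 'X') = false by simp [hX], Bool.false_eq_true, if_false, hd,
    if_true]

theorem pvLoopA_cons_other (c : Char) (rest : List Char) (counter total : Int)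
    (hX : c ≠ 'X') (hd : ¬ c.isDigit = true) :
    pvLoopA (c :: rest) counter total = pvLoopA rest counter total := by
  simp only [pvLoopA, show (c == 'X') = false by simp [hX], Bool.false_eq_true, if_false, hd]

theorem pvG_cons_X_zero (rest : List Char) (t : Int) :
    pvG ('X' :: rest) 0 t = pvG rest 1 (t + 13) := by
  have hw : t + pvWeighted ('X' :: List.filter pvP rest) 0
      = (t + 13) + pvWeighted (List.filter pvP rest) 1 := by
    simp only [pvWeighted, pvVal, beq_self_eq_true, if_true]
    push_cast; ring
  simp only [pvG, List.filter_cons, show pvP 'X' = true by decide, if_true, List.drop_one,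
    List.tail_cons, if_neg (by omega : ¬ (1:Nat) = 0)]
  by_cases hm : (List.filter pvP rest).contains 'X' = true
  · rw [if_pos hm, if_pos hm]
  · rw [if_neg hm, if_neg hm, List.length_cons]
    congr 1
    · rw [Bool.eq_iff_iff]; simp only [beq_iff_eq]; omega
    · rw [hw]

theorem pvG_cons_X_pos (rest : List Char) (k : Nat) (t : Int) (hk : k ≠ 0) :
    pvG ('X' :: rest) k t = false := by
  simp only [pvG, List.filter_cons, show pvP 'X' = true by decide, if_true, if_neg hk]
  rw [if_pos (by simp)]

theorem pvG_cons_digit (c : Char) (rest : List Char) (k : Nat) (t : Int)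
    (hX : c ≠ 'X') (hd : c.isDigit = true) :
    pvG (c :: rest) k t = pvG rest (k + 1) (t + ((c.toNat : Int) - 48) * ((k : Int) + 1)) := by
  have hp : pvP c = true := by simp [pvP, hd]
  have hcbeq : (c == 'X') = false := by rw [beq_eq_false_iff_ne]; exact hX
  have hxbeq : ('X' == c) = false := by rw [beq_eq_false_iff_ne]; exact Ne.symm hX
  have hw : t + pvWeighted (c :: List.filter pvP rest) k
      = (t + ((c.toNat : Int) - 48) * ((k : Int) + 1)) + pvWeighted (List.filter pvP rest) (k + 1) := by
    simp only [pvWeighted, pvVal, hcbeq, Bool.false_eq_true, if_false]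
    ring
  have hsel : (if k = 0 then (c :: List.filter pvP rest).drop 1
        else c :: List.filter pvP rest).contains 'X'
      = (List.filter pvP rest).contains 'X' := by
    by_cases hk : k = 0
    · rw [if_pos hk, List.drop_one, List.tail_cons]
    · rw [if_neg hk, List.contains_cons, hxbeq, Bool.false_or]
  simp only [pvG, List.filter_cons, hp, if_true, if_neg (by omega : ¬ k + 1 = 0)]
  rw [hsel]
  by_cases hm : (List.filter pvP rest).contains 'X' = true
  · rw [if_pos hm, if_pos hm]
  · rw [if_neg hm, if_neg hm, List.length_cons]
    congr 1
    · rw [Bool.eq_iff_iff]; simp only [beq_iff_eq]; omega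
    · rw [hw]

theorem pvG_cons_other (c : Char) (rest : List Char) (k : Nat) (t : Int)
    (hp : pvP c = false) :
    pvG (c :: rest) k t = pvG rest k t := by
  simp only [pvG, List.filter_cons, hp, Bool.false_eq_true, if_false]

theorem pvLoopA_eq_G (l : List Char) : ∀ (k : Nat) (t : Int),
    pvLoopA l ((k : Int) + 1) t = pvG l k t := by
  induction l with
  | nil =>
    intro k t
    simp only [pvLoopA, pvG, List.filter_nil, List.contains_nil, List.drop_nil, ite_self,
      Bool.false_eq_true, if_false, pvWeighted, List.length_nil]
    congr 1
    · rw [Bool.eq_iff_iff]; simp only [beq_iff_eq]; omega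
    · rw [Int.add_zero]
  | cons c rest ih =>
    intro k t
    by_cases hX : c = 'X'
    · subst hX
      rw [pvLoopA_cons_X]
      by_cases hk : k = 0
      · subst hk
        rw [if_pos (by norm_num)]
        have h2 : ((0 : Nat) : Int) + 1 + 1 = ((1 : Nat) : Int) + 1 := by norm_num
        have h3 : t + 13 * (((0 : Nat) : Int) + 1) = t + 13 := by norm_num
        rw [h2, h3, ih 1 (t + 13), pvG_cons_X_zero]
      · rw [if_neg (by omega), pvG_cons_X_pos _ _ _ hk]
    · by_cases hd : c.isDigit = true
      · rw [pvLoopA_cons_digit _ _ _ _ hX hd,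
          show (k : Int) + 1 + 1 = ((k + 1 : Nat) : Int) + 1 by push_cast; ring,
          ih (k + 1) _, pvG_cons_digit _ _ _ _ hX hd]
      · rw [pvLoopA_cons_other _ _ _ _ hX hd, ih k t,
          pvG_cons_other _ _ _ _ (by simp [pvP, hd, hX])]

-- ---- B's side (loop = pvC on the filtered list) ----
theorem pvLoopB_eq_C (l : List Char) : ∀ (s t n : Int),
    (pvLoopB l s t n true
        = if (l.filter pvP) = [] then (n == 15 && t % 16 == 0) else false)
    ∧ pvLoopB l s t n false = pvC (l.filter pvP) s t n := by
  induction l with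
  | nil =>
    intro s t n
    simp [pvLoopB, pvC, pvW]
  | cons c rest ih =>
    intro s t n
    by_cases hp : pvP c = true
    · have hstep_t : pvLoopB (c :: rest) s t n true = false := by
        simp only [pvLoopB, pvP] at hp ⊢; rw [if_pos hp]; simp
      have hfilt : (c :: rest).filter pvP = c :: rest.filter pvP := by
        rw [List.filter_cons, if_pos hp]
      refine ⟨by rw [hstep_t, hfilt]; simp, ?_⟩
      have hv : (if c == 'X' then (13:Int) else (c.toNat : Int) - 48) = pvVal c := rfl
      have hstep : pvLoopB (c :: rest) s t n false
          = pvLoopB rest (s + pvVal c) (t + (s + pvVal c)) (n + 1) (c == 'X') := by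
        simp only [pvLoopB, pvP] at hp ⊢
        rw [if_pos hp, if_neg (by simp), hv]
      rw [hstep, hfilt]
      by_cases hX : c = 'X'
      · subst hX
        rw [show ('X' == 'X') = true from rfl, (ih _ _ _).1]
        -- closed form for 'X' :: L with the flag set
        by_cases hnil : rest.filter pvP = []
        · rw [if_pos hnil, hnil]
          simp only [pvC, List.dropLast_singleton, List.contains_nil, Bool.false_eq_true,
            if_false, List.length_cons, List.length_nil, pvW, pvVal, beq_self_eq_true, if_true]
          have h16 : t + (s + 13) = t + ((0 + 1 : Nat) : Int) * s + (13 * (((0 : Nat) : Int) + 1) + 0) := by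
            push_cast; ring
          rw [h16]
          congr 2
        · rw [if_neg hnil]
          obtain ⟨d, L, hdl⟩ := List.exists_cons_of_ne_nil hnil
          rw [hdl]
          simp only [pvC, List.dropLast_cons₂, List.contains_cons, beq_self_eq_true,
            Bool.true_or, if_pos]
      · have hb : (c == 'X') = false := by rw [beq_eq_false_iff_ne]; exact hX
        rw [hb, (ih _ _ _).2]
        -- closed form for digit c :: L with the flag still false
        have hdl : (c :: rest.filter pvP).dropLast.contains 'X'
            = (rest.filter pvP).dropLast.contains 'X' := by
          cases h : rest.filter pvP with
          | nil => simp
          | cons d L =>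
            rw [List.dropLast_cons₂, List.contains_cons,
              show ('X' == c) = false by rw [beq_eq_false_iff_ne]; exact Ne.symm hX,
              Bool.false_or]
        simp only [pvC, hdl]
        by_cases hm : (rest.filter pvP).dropLast.contains 'X' = true
        · rw [if_pos hm, if_pos hm]
        · rw [if_neg hm, if_neg hm, List.length_cons]
          congr 1
          · rw [Bool.eq_iff_iff]; simp only [beq_iff_eq]; push_cast; omega
          · congr 1
            simp only [pvW]
            push_cast; ring
    · have hfilt : (c :: rest).filter pvP = rest.filter pvP := by
        rw [List.filter_cons, if_neg (by simp [hp])]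
      have h1 : ∀ b, pvLoopB (c :: rest) s t n b = pvLoopB rest s t n b := by
        intro b
        simp only [pvLoopB, pvP] at hp ⊢
        rw [if_neg (by simp [hp])]
      exact ⟨by rw [h1, hfilt, (ih s t n).1], by rw [h1, hfilt, (ih s t n).2]⟩

-- ---- bridging the two closed forms ----
theorem pvWeighted_append (l1 l2 : List Char) : ∀ (k : Nat),
    pvWeighted (l1 ++ l2) k = pvWeighted l1 k + pvWeighted l2 (k + l1.length) := by
  induction l1 with
  | nil => intro k; simp [pvWeighted]
  | cons c rest ih =>
    intro k
    simp only [List.cons_append, pvWeighted, ih (k + 1), List.length_cons]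
    rw [show k + 1 + rest.length = k + (rest.length + 1) by omega]
    ring

theorem pvWeighted_reverse (L : List Char) : pvWeighted L.reverse 0 = pvW L := by
  induction L with
  | nil => simp [pvWeighted, pvW]
  | cons c rest ih =>
    rw [List.reverse_cons, pvWeighted_append, ih]
    simp only [pvWeighted, pvW, List.length_reverse]
    push_cast; ring

theorem pvDropOne_reverse (L : List Char) : L.reverse.drop 1 = L.dropLast.reverse := by
  cases h : L.reverse with
  | nil => simp [List.reverse_eq_nil_iff.mp h]
  | cons d M =>
    have : L = (d :: M).reverse := by rw [← h, List.reverse_reverse]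
    subst this
    simp

-- ===== VERDICT (by name: the statement is the Claim_ definition above) =====
theorem verify_Codabar_spec : Claim_equal_verify_Codabar := by
  intro str _
  unfold Spec_verify_Codabar verify_Codabar verify_Codabar_alt
  have hA := pvLoopA_eq_G str.toList.reverse 0 0
  rw [show ((0 : Nat) : Int) + 1 = 1 by norm_num] at hA
  rw [hA, (pvLoopB_eq_C str.toList 0 0 0).2]
  set L := str.toList.filter pvP with hL
  have hfr : str.toList.reverse.filter pvP = L.reverse := by
    rw [hL, List.filter_reverse]
  have hmem : L.dropLast.reverse.contains 'X' = L.dropLast.contains 'X' := by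
    simp
  simp only [pvG, pvC, hfr, if_true, pvDropOne_reverse, hmem]
  by_cases hm : L.dropLast.contains 'X' = true
  · rw [if_pos hm, if_pos hm]
  · rw [if_neg hm, if_neg hm, List.length_reverse]
    congr 1
    · rw [Bool.eq_iff_iff]; simp only [beq_iff_eq]; omega
    · rw [Int.zero_add, pvWeighted_reverse]
      congr 1
      ring
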